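-- pv_equiv track=rewrite | github.com/EricWay1024/Algorithm-Learning | maths/P9387/s.py | f
-- ===== SOURCE A (Python) =====
-- MOD = int(1e9+7)
--
-- def f(s, x, i):
--     p = 1 << i
--     if p == 2:
--         return 1 if x == 1 and s == 1 else 0
--     q = 1 << (i - 1)
--     if s < q:
--         if x < q:
--             return f(s, x, i - 1)
--         else:
--             return (2 * f(s, x - q, i - 1)) % MOD
--     else:
--         if x < q:
--             return 0
--         else:
--             return (q - f(p - 1 - s, p - 1 - x, i - 1)) % MOD
-- ===== SOURCE B (Python) =====
-- MOD = int(1e9+7)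
--
-- def f(s, x, i):
--     # One descending for-loop over the levels, accumulating an affine map
--     # v -> (M*v + C) % MOD applied to the base value; constant stack.
--     M, C = 1, 0
--     done = False
--     for j in range(i, 1, -1):
--         q = 1 << (j - 1)
--         if s < q:
--             if x >= q:
--                 x -= q
--                 M = M * 2 % MOD
--         elif x < q:
--             done = True
--             break
--         else:
--             s, x = q * 2 - 1 - s, q * 2 - 1 - x
--             C = (C + M * q) % MOD
--             M = M * (MOD - 1) % MOD
--     if done:
--         return C % MOD
--     base = 1 if s == 1 and x == 1 else 0
--     return (M * base + C) % MOD
-- ===== Notes on version B (the rewrite author's own statement) =====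
-- stated objective: alternative
-- what changed: Replaces A's depth-i recursion (each level post-processing the recursive result) with a single descending for-loop that accumulates an affine map (M, C) mod MOD and applies it to the base value, running in constant stack space.
-- outside the precondition, e.g. on f(0, 0, 9950): A returns 0, B returns 0
import Mathlib
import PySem

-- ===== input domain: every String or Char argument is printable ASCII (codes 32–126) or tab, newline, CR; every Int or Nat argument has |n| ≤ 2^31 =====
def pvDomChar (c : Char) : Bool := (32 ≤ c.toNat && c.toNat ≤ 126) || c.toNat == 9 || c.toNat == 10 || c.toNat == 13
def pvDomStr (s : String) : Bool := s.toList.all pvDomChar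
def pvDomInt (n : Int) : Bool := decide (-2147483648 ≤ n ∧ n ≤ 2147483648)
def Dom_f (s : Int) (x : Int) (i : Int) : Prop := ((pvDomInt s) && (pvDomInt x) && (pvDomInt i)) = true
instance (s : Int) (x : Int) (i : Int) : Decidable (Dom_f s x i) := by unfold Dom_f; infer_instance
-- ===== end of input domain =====

-- B replaces A's depth-i recursion by one descending for-loop accumulating an affine map
-- (M, C) mod MOD applied to the base value; it runs in constant stack space and the
-- return values are proved equal wherever A returns.

def pMOD : Int := 1000000007

-- ===== PORT A =====
-- Recursion on the fuel n = i.toNat (the Python recursion decreases i by 1 each call and,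
-- under Pre_f, stops at i = 1).  The fuel-0 value is unreachable under Pre_f (Python raises there).
-- Python's `%` with the positive modulus MOD is exactly Lean's `%` (Int.emod) here.
def fAux (s x : Int) : Nat → Int
  | 0 => 0
  | n+1 =>
    -- p = 1 << i  with i = n+1;  q = 1 << (i-1) = 2^n
    if (2:Int) ^ (n+1) = 2 then (if x = 1 ∧ s = 1 then 1 else 0)
    else
      if s < (2:Int) ^ n then
        if x < (2:Int) ^ n then fAux s x n
        else (2 * fAux s (x - (2:Int) ^ n) n) % pMOD
      else
        if x < (2:Int) ^ n then 0
        else ((2:Int) ^ n - fAux ((2:Int) ^ (n+1) - 1 - s) ((2:Int) ^ (n+1) - 1 - x) n) % pMOD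

def f (s : Int) (x : Int) (i : Int) : Int := fAux s x i.toNat

-- ===== PORT B =====
-- Source B's for-loop over range(i, 1, -1): a foldl over PySem.List.pyRange i 1 (-1) whose state
-- (done, s, x, M, C) is exactly Source B's mutable state; `break` is the done flag short-circuiting
-- the remaining iterations.  `1 << (j - 1)` is 2 ^ (j-1).toNat (exact: every j in the range is ≥ 2).
def fAltStep (st : Bool × Int × Int × Int × Int) (j : Int) : Bool × Int × Int × Int × Int :=
  match st with
  | (true, _, _, _, _) => st
  | (false, s, x, M, C) =>
    let q : Int := 2 ^ (j - 1).toNat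
    if s < q then
      if x ≥ q then (false, s, x - q, M * 2 % pMOD, C) else (false, s, x, M, C)
    else if x < q then (true, s, x, M, C)
    else (false, q * 2 - 1 - s, q * 2 - 1 - x, M * (pMOD - 1) % pMOD, (C + M * q) % pMOD)

def f_alt (s : Int) (x : Int) (i : Int) : Int :=
  match (PySem.List.pyRange i 1 (-1)).foldl fAltStep (false, s, x, 1, 0) with
  | (true, _, _, _, C) => C % pMOD
  | (false, s, x, M, C) => (M * (if s = 1 ∧ x = 1 then 1 else 0) + C) % pMOD

-- ===== PRECONDITION & SPEC =====
-- Pre_f excludes i ≤ 0, where A's `1 << (i - 1)` raises ValueError, and i > 9900, where A's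
-- depth-i recursion exhausts the interpreter's recursion limit (10000 here) and raises
-- RecursionError (the exact failing i is 9998 on an empty stack and lower under any caller
-- frames, so a handful of near-limit i on which a top-of-stack call still returns are excluded with it).
def Pre_f (s : Int) (x : Int) (i : Int) : Prop := 1 ≤ i ∧ i ≤ 9900
instance (s : Int) (x : Int) (i : Int) : Decidable (Pre_f s x i) := by unfold Pre_f; infer_instance
def pvWitness_f : Int × Int × Int := (1, 1, 3)

def Spec_f (s : Int) (x : Int) (i : Int) (out : Int) : Prop := out = f_alt s x i
instance (s : Int) (x : Int) (i : Int) (out : Int) : Decidable (Spec_f s x i out) := by unfold Spec_f; infer_instance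

-- ===== CLAIM (what is proved, stated in full; the proofs are below) =====
def Claim_equal_f : Prop := ∀ (s : Int) (x : Int) (i : Int), Dom_f s x i → Pre_f s x i → Spec_f s x i (f s x i)

-- ===== LEMMAS AND PROOFS =====

theorem pMOD_pos : (0:Int) < pMOD := by norm_num [pMOD]

-- A's result is always a residue in [0, MOD).
theorem fAux_bounds (n : Nat) : ∀ s x : Int, 0 ≤ fAux s x n ∧ fAux s x n < pMOD := by
  induction n with
  | zero => intro s x; simp only [fAux]; exact ⟨le_refl 0, pMOD_pos⟩
  | succ n ih =>
    intro s x
    show (if (2:Int) ^ (n+1) = 2 then _ else _) ≥ 0 ∧ _ < pMOD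
    simp only [fAux]
    split_ifs
    all_goals first
      | exact ⟨Int.emod_nonneg _ (by norm_num [pMOD]), Int.emod_lt_of_pos _ pMOD_pos⟩
      | exact ih _ _
      | exact ⟨by norm_num, by norm_num [pMOD]⟩

-- `a % MOD` is congruent to `a` mod MOD.
theorem hsm (a : Int) : Int.ModEq pMOD (a % pMOD) a := Int.emod_emod_of_dvd a dvd_rfl

-- once done, the fold is inert
theorem foldl_step_done (l : List Int) (s x M C : Int) :
    l.foldl fAltStep (true, s, x, M, C) = (true, s, x, M, C) := by
  induction l with
  | nil => rfl
  | cons a l ih => simpa [fAltStep] using ih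

-- finalization of Source B after the loop
def fAltFin (st : Bool × Int × Int × Int × Int) : Int :=
  match st with
  | (true, _, _, _, C) => C % pMOD
  | (false, s, x, M, C) => (M * (if s = 1 ∧ x = 1 then 1 else 0) + C) % pMOD

theorem f_alt_eq_fin (s x i : Int) :
    f_alt s x i = fAltFin ((PySem.List.pyRange i 1 (-1)).foldl fAltStep (false, s, x, 1, 0)) := by
  unfold f_alt fAltFin
  rfl

-- Loop invariant: running B's loop from level n+1 with accumulator (M, C) and finalizing
-- yields (M * fAux + C) % MOD.
theorem fAux_succ (s x : Int) (n : Nat) : fAux s x (n+1) =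
    (if (2:Int) ^ (n+1) = 2 then (if x = 1 ∧ s = 1 then 1 else 0)
     else
       if s < (2:Int) ^ n then
         if x < (2:Int) ^ n then fAux s x n
         else (2 * fAux s (x - (2:Int) ^ n) n) % pMOD
       else
         if x < (2:Int) ^ n then 0
         else ((2:Int) ^ n - fAux ((2:Int) ^ (n+1) - 1 - s) ((2:Int) ^ (n+1) - 1 - x) n) % pMOD) := rfl

theorem fAltStep_false (s x M C j : Int) : fAltStep (false, s, x, M, C) j =
    (if s < 2 ^ (j - 1).toNat then
       if x ≥ 2 ^ (j - 1).toNat then (false, s, x - 2 ^ (j - 1).toNat, M * 2 % pMOD, C)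
       else (false, s, x, M, C)
     else if x < 2 ^ (j - 1).toNat then (true, s, x, M, C)
     else (false, 2 ^ (j - 1).toNat * 2 - 1 - s, 2 ^ (j - 1).toNat * 2 - 1 - x,
           M * (pMOD - 1) % pMOD, (C + M * 2 ^ (j - 1).toNat) % pMOD)) := rfl

-- Loop invariant: running B's loop from level n+1 with accumulator (M, C) and finalizing
-- yields (M * fAux + C) % MOD.
theorem loop_inv (n : Nat) : ∀ s x M C : Int,
    fAltFin ((PySem.List.pyRange ((n:Int)+1) 1 (-1)).foldl fAltStep (false, s, x, M, C))
      = (M * fAux s x (n+1) + C) % pMOD := by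
  induction n with
  | zero =>
    intro s x M C
    rw [PySem.List.pyRange_neg_one_eq_nil (by norm_num)]
    show fAltFin (false, s, x, M, C) = _
    simp only [fAltFin, fAux]
    norm_num
    by_cases hs : s = 1 <;> by_cases hx : x = 1 <;> simp [hs, hx]
  | succ n ih =>
    intro s x M C
    rw [show ((((n+1:Nat)):Int)+1) = ((n:Int)+1+1) from by push_cast; ring]
    have hcons : PySem.List.pyRange ((n:Int)+1+1) 1 (-1)
        = ((n:Int)+1+1) :: PySem.List.pyRange ((n:Int)+1) 1 (-1) := by
      have := PySem.List.pyRange_neg_one_cons (a := (n:Int)+1+1) (b := 1) (by push_cast; omega)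
      simpa using this
    have hq : (((n:Int)+1+1-1)).toNat = n+1 := by omega
    have hp : ¬ ((2:Int) ^ (n+1+1) = 2) := by
      have h4 : (4:Int) ≤ 2 ^ (n+1+1) := by
        calc (4:Int) = 2 ^ 2 := by norm_num
        _ ≤ 2 ^ (n+1+1) := by apply pow_le_pow_right₀ (by norm_num) (by omega)
      omega
    rw [hcons, List.foldl_cons, fAltStep_false, hq, fAux_succ, if_neg hp]
    by_cases h2 : s < (2:Int) ^ (n+1)
    · rw [if_pos h2, if_pos h2]
      by_cases h3 : x < (2:Int) ^ (n+1)
      · rw [if_neg (by omega : ¬ x ≥ (2:Int) ^ (n+1)), if_pos h3]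
        exact ih s x M C
      · -- doubling branch
        rw [if_pos (by omega : x ≥ (2:Int) ^ (n+1)), if_neg h3, ih]
        set v := fAux s (x - (2:Int) ^ (n+1)) (n+1) with hv
        have l : (M * 2 % pMOD * v + C) % pMOD = (M * 2 * v + C) % pMOD :=
          ((hsm (M * 2)).mul_right v).add_right C
        have r : (M * (2 * v % pMOD) + C) % pMOD = (M * (2 * v) + C) % pMOD :=
          ((hsm (2 * v)).mul_left M).add_right C
        rw [l, show M * 2 * v + C = M * (2 * v) + C from by ring]
        exact r.symm
    · rw [if_neg h2, if_neg h2]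
      by_cases h3 : x < (2:Int) ^ (n+1)
      · -- zero branch: done flag set, loop inert
        rw [if_pos h3, if_pos h3, foldl_step_done]
        show C % pMOD = _
        simp
      · -- reflection branch
        rw [if_neg h3, if_neg h3, ih,
            show (2:Int) ^ (n+1) * 2 - 1 - s = (2:Int) ^ (n+1+1) - 1 - s from by ring,
            show (2:Int) ^ (n+1) * 2 - 1 - x = (2:Int) ^ (n+1+1) - 1 - x from by ring]
        set v := fAux ((2:Int) ^ (n+1+1) - 1 - s) ((2:Int) ^ (n+1+1) - 1 - x) (n+1) with hv
        set q : Int := (2:Int) ^ (n+1) with hqq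
        have l : (M * (pMOD - 1) % pMOD * v + (C + M * q) % pMOD) % pMOD
               = (M * (pMOD - 1) * v + (C + M * q)) % pMOD :=
          Int.ModEq.add ((hsm (M * (pMOD - 1))).mul_right v) (hsm (C + M * q))
        have mid : (M * (pMOD - 1) * v + (C + M * q)) % pMOD = (M * (q - v) + C) % pMOD :=
          Int.modEq_iff_dvd.mpr ⟨-(M * v), by ring⟩
        have r : (M * ((q - v) % pMOD) + C) % pMOD = (M * (q - v) + C) % pMOD :=
          ((hsm (q - v)).mul_left M).add_right C
        rw [l, mid, ← r]

theorem f_eq_f_alt (s x i : Int) (hi : 1 ≤ i) : f s x i = f_alt s x i := by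
  obtain ⟨n, hn⟩ : ∃ n : Nat, i = (n:Int) + 1 := ⟨(i - 1).toNat, by omega⟩
  subst hn
  rw [f_alt_eq_fin, loop_inv]
  unfold f
  rw [show (((n:Int)+1)).toNat = n + 1 from by omega]
  have hb := fAux_bounds (n+1) s x
  rw [one_mul, add_zero, Int.emod_eq_of_lt hb.1 hb.2]

-- ===== VERDICT (by name: the statement is the Claim_ definition above) =====
theorem f_spec : Claim_equal_f := by
  intro s x i _ hpre
  exact f_eq_f_alt s x i hpre.1
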